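-- pv_equiv track=rewrite | github.com/semillabitcoin/broadcast-pool | src/pool/nip44.py | _calc_padded_len
-- ===== SOURCE A (Python) =====
-- def _calc_padded_len(unpadded_len: int) -> int:
--     """NIP-44 padding: next power of 2, minimum 32."""
--     if unpadded_len <= 32:
--         return 32
--     next_pow = 1
--     while next_pow < unpadded_len:
--         next_pow <<= 1
--     chunk = max(32, next_pow // 8)
--     return chunk * ((unpadded_len + chunk - 1) // chunk)
-- ===== SOURCE B (Python) =====
-- def _calc_padded_len(unpadded_len: int) -> int:
--     """NIP-44 padding: next power of 2, minimum 32."""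
--     if unpadded_len <= 32:
--         return 32
--     next_pow = 1 << (unpadded_len - 1).bit_length()
--     chunk = max(32, next_pow // 8)
--     return chunk * ((unpadded_len + chunk - 1) // chunk)
-- ===== Notes on version B (the rewrite author's own statement) =====
-- stated objective: idiomatic
-- what changed: Replaces the while-loop that repeatedly doubles next_pow until it reaches unpadded_len with a closed-form bit_length shift computing the smallest power of two at least unpadded_len without iterating.
import Mathlib
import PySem

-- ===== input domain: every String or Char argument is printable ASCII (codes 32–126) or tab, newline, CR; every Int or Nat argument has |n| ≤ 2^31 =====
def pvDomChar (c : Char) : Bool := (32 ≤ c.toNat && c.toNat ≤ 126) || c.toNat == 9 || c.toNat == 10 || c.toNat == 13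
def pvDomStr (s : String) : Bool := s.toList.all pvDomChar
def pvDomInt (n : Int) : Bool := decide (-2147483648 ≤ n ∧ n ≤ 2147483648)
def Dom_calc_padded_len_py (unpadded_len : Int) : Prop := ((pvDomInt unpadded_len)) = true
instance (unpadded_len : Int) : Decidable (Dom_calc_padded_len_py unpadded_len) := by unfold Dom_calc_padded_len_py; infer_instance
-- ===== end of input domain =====

-- B replaces A's doubling while-loop by the closed form 1 << (n-1).bit_length(); equal on all ints.
-- ===== PORT A =====
-- while next_pow < unpadded_len: next_pow <<= 1   (hp carries the loop invariant 1 ≤ next_pow for termination)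
def pvNextPowLoop (n p : Int) (hp : 1 ≤ p) : Int :=
  if h : p < n then pvNextPowLoop n (p <<< (1:Nat)) (by rw [Int.shiftLeft_eq]; omega) else p
termination_by (n - p).toNat
decreasing_by
  rw [Int.shiftLeft_eq]
  simp only [pow_one]
  omega

def calc_padded_len_py (unpadded_len : Int) : Int :=
  if unpadded_len ≤ 32 then 32
  else
    let next_pow := pvNextPowLoop unpadded_len 1 (by omega)
    let chunk := max 32 (PySem.Int.floordiv next_pow 8)
    chunk * (PySem.Int.floordiv (unpadded_len + chunk - 1) chunk)

-- ===== PORT B =====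
def calc_padded_len_py_alt (unpadded_len : Int) : Int :=
  if unpadded_len ≤ 32 then 32
  else
    let next_pow : Int := (1 : Int) <<< PySem.Int.bitLength (unpadded_len - 1)
    let chunk := max 32 (PySem.Int.floordiv next_pow 8)
    chunk * (PySem.Int.floordiv (unpadded_len + chunk - 1) chunk)

-- ===== PRECONDITION & SPEC =====
def Spec_calc_padded_len_py (unpadded_len : Int) (out : Int) : Prop := out = calc_padded_len_py_alt unpadded_len
instance (unpadded_len : Int) (out : Int) : Decidable (Spec_calc_padded_len_py unpadded_len out) := by unfold Spec_calc_padded_len_py; infer_instance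

-- ===== CLAIM (what is proved, stated in full; the proofs are below) =====
def Claim_equal_calc_padded_len_py : Prop := ∀ (unpadded_len : Int), Dom_calc_padded_len_py unpadded_len → Spec_calc_padded_len_py unpadded_len (calc_padded_len_py unpadded_len)

-- ===== LEMMAS AND PROOFS =====

theorem pvNextPowLoop_ge (n p : Int) (hp : 1 ≤ p) (h : ¬ p < n) :
    pvNextPowLoop n p hp = p := by
  rw [pvNextPowLoop]; simp [h]

theorem pvNextPowLoop_lt (n p : Int) (hp : 1 ≤ p) (h : p < n) :
    pvNextPowLoop n p hp = pvNextPowLoop n (p <<< (1:Nat)) (by rw [Int.shiftLeft_eq]; omega) := by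
  rw [pvNextPowLoop]; simp [h]

-- proof-irrelevant congruence for the loop's value argument
theorem pvNextPowLoop_congr (n p q : Int) (hp : 1 ≤ p) (hq : 1 ≤ q) (hpq : p = q) :
    pvNextPowLoop n p hp = pvNextPowLoop n q hq := by subst hpq; rfl

-- the loop starting at 2^k computes 2^(bitLength (n-1)) when bitLength (n-1) = k + d and n > 1
theorem pvNextPowLoop_pow (n : Int) (hn : 1 < n) :
    ∀ (d k : Nat), PySem.Int.bitLength (n - 1) = k + d →
      pvNextPowLoop n ((2:Int)^k) (by have := pow_pos (by norm_num : (0:Int) < 2) k; omega)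
        = (2:Int)^(PySem.Int.bitLength (n - 1)) := by
  intro d
  induction d with
  | zero =>
    intro k hk
    have hub := PySem.Int.lt_two_pow_bitLength (n - 1)
    have habs : ((n - 1).natAbs : Int) = n - 1 := Int.natAbs_of_nonneg (by omega)
    have hle : n ≤ (2:Int)^k := by
      have : ((n - 1).natAbs : Int) < ((2:Nat)^(PySem.Int.bitLength (n - 1)) : Nat) := by
        exact_mod_cast hub
      rw [habs] at this
      rw [hk, Nat.add_zero] at this
      push_cast at this
      omega
    rw [pvNextPowLoop_ge n _ _ (by omega), hk, Nat.add_zero]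
  | succ d ih =>
    intro k hk
    have hne : n - 1 ≠ 0 := by omega
    have hlb := PySem.Int.two_pow_bitLength_le (n - 1) hne
    have habs : ((n - 1).natAbs : Int) = n - 1 := Int.natAbs_of_nonneg (by omega)
    have hlt : (2:Int)^k < n := by
      have h1 : (2:Nat)^k ≤ (2:Nat)^(PySem.Int.bitLength (n - 1) - 1) :=
        Nat.pow_le_pow_right (by norm_num) (by omega)
      have h2 : ((2:Nat)^k : Int) ≤ ((n - 1).natAbs : Int) := by
        exact_mod_cast le_trans h1 hlb
      rw [habs] at h2
      push_cast at h2
      omega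
    rw [pvNextPowLoop_lt n _ _ hlt]
    rw [pvNextPowLoop_congr n _ ((2:Int)^(k+1)) _
      (by have := pow_pos (by norm_num : (0:Int) < 2) (k+1); omega)
      (by rw [Int.shiftLeft_eq]; ring)]
    exact ih (k + 1) (by omega)

theorem calc_padded_len_py_spec : Claim_equal_calc_padded_len_py := by
  intro n _
  unfold Spec_calc_padded_len_py calc_padded_len_py calc_padded_len_py_alt
  by_cases h32 : n ≤ 32
  · simp [h32]
  · simp only [h32, if_false]
    have hloop : pvNextPowLoop n 1 (by omega) = (1:Int) <<< PySem.Int.bitLength (n - 1) := by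
      rw [pvNextPowLoop_congr n 1 ((2:Int)^0) (by omega)
        (by have := pow_pos (by norm_num : (0:Int) < 2) 0; omega) (by norm_num)]
      rw [pvNextPowLoop_pow n (by omega) (PySem.Int.bitLength (n - 1)) 0 (by omega)]
      rw [Int.shiftLeft_eq, one_mul]
    rw [hloop]
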